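-- pv_equiv track=rewrite | github.com/sibap865/ineuron_accessment | python/Q3.py | generate_door_mat
-- ===== SOURCE A (Python) =====
-- def generate_door_mat(n, m):
--
--   if not n % 2:
--     raise ValueError("n must be an odd natural number")
--
--   # Calculate the center row
--   center_row = int(n / 2)
--
--   # Initialize an empty list to store the door mat design
--   door_mat = []
--
--   # Build the top half of the door mat
--   for i in range(center_row):
--     # Calculate the number of '-' characters to print on each side
--     border_length = int((m - (i * 3 + 1)) / 2)
--     design_string = "-" * border_length + ".|." * (i + 1) + "-" * border_length
--     door_mat.append(design_string)
--
--   # Add the welcome message to the center row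
--   welcome_string = "-" * int((m - len("WELCOME")) / 2) + "WELCOME" + "-" * int((m - len("WELCOME")) / 2)
--   door_mat.append(welcome_string)
--
--   # Build the bottom half of the door mat (reverse of the top half)
--   for i in range(center_row - 1, -1, -1):
--     # Calculate the number of '-' characters to print on each side
--     border_length = int((m - (i * 3 + 1)) / 2)
--     design_string = "-" * border_length + ".|." * (i + 1) + "-" * border_length
--     door_mat.append(design_string)
--
--   return door_mat
-- ===== SOURCE B (Python) =====
-- def generate_door_mat(n, m):
--     if n % 2 == 0:
--         raise ValueError("n must be an odd natural number")
--     w = (m - 7) // 2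
--     mat = ["-" * w + "WELCOME" + "-" * w]
--     # grow the mat inside-out: wrap the current mat with the i-th design row on both sides
--     for i in reversed(range(n // 2)):
--         b = (m - (3 * i + 1)) // 2
--         row = "-" * b + ".|." * (i + 1) + "-" * b
--         mat = [row] + mat + [row]
--     return mat
-- ===== Notes on version B (the rewrite author's own statement) =====
-- stated objective: alternative
-- what changed: Replaces A's three-part construction (top loop, welcome append, second reversed-range loop re-deriving each bottom row) by growing the mat inside-out from the WELCOME line, wrapping it with each design row on both sides, computing every design row once.
import Mathlib
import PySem

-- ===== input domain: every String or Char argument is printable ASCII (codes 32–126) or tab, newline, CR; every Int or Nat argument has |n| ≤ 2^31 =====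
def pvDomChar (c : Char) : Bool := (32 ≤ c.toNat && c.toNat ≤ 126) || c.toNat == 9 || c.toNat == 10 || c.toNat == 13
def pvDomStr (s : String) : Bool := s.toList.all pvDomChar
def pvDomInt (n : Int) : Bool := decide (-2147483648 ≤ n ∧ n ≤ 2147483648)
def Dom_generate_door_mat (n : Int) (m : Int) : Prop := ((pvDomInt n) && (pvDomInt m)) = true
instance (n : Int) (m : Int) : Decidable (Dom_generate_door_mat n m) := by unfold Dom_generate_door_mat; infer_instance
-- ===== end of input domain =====

-- B builds the mat inside-out from the WELCOME line instead of A's top-loop/center/bottom-loop; same rows, same cost.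

-- shared primitive: Python's  s * k  on strings, as a char list ('' for k ≤ 0)
def pyStrRep (s : String) (k : Int) : List Char := PySem.List.pyRepeat s.toList k

-- ===== PORT A =====
-- A's design row: int((m-(i*3+1))/2) is float division then int(), i.e. truncation toward zero
-- (exact as Int.tdiv for |m| ≤ 2^31, where the float quotient is exact)
def gdmA_design (m i : Int) : String :=
  String.ofList (pyStrRep "-" (Int.tdiv (m - (i * 3 + 1)) 2) ++ pyStrRep ".|." (i + 1)
             ++ pyStrRep "-" (Int.tdiv (m - (i * 3 + 1)) 2))

def generate_door_mat (n : Int) (m : Int) : List String :=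
  if PySem.Int.mod n 2 = 0 then []  -- Python raises ValueError here; excluded by Pre_
  else
    let center_row := Int.tdiv n 2  -- int(n / 2), truncation
    let door_mat := (PySem.List.pyRange 0 center_row 1).foldl
      (fun acc i => acc ++ [gdmA_design m i]) []
    let door_mat := door_mat ++
      [String.ofList (pyStrRep "-" (Int.tdiv (m - 7) 2) ++ "WELCOME".toList
                  ++ pyStrRep "-" (Int.tdiv (m - 7) 2))]
    (PySem.List.pyRange (center_row - 1) (-1) (-1)).foldl
      (fun acc i => acc ++ [gdmA_design m i]) door_mat

-- ===== PORT B =====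
def gdmB_row (m i : Int) : String :=
  String.ofList (pyStrRep "-" (PySem.Int.floordiv (m - (3 * i + 1)) 2) ++ pyStrRep ".|." (i + 1)
             ++ pyStrRep "-" (PySem.Int.floordiv (m - (3 * i + 1)) 2))

def generate_door_mat_alt (n : Int) (m : Int) : List String :=
  if PySem.Int.mod n 2 = 0 then []  -- raises ValueError; excluded by Pre_
  else
    let w := PySem.Int.floordiv (m - 7) 2
    let init := [String.ofList (pyStrRep "-" w ++ "WELCOME".toList ++ pyStrRep "-" w)]
    ((PySem.List.pyRange 0 (PySem.Int.floordiv n 2) 1).reverse).foldl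
      (fun mat i => [gdmB_row m i] ++ mat ++ [gdmB_row m i]) init

-- ===== PRECONDITION & SPEC =====
-- Pre_ excludes exactly the inputs where the Python A raises ValueError (even n); nothing else.
def Pre_generate_door_mat (n : Int) (m : Int) : Prop := PySem.Int.mod n 2 ≠ 0
instance (n : Int) (m : Int) : Decidable (Pre_generate_door_mat n m) := by
  unfold Pre_generate_door_mat; infer_instance

def pvWitness_generate_door_mat : Int × Int := (7, 21)

def Spec_generate_door_mat (n : Int) (m : Int) (out : List String) : Prop := out = generate_door_mat_alt n m
instance (n : Int) (m : Int) (out : List String) : Decidable (Spec_generate_door_mat n m out) := by unfold Spec_generate_door_mat; infer_instance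

-- ===== CLAIM (what is proved, stated in full; the proofs are below) =====
def Claim_equal_generate_door_mat : Prop := ∀ (n : Int) (m : Int), Dom_generate_door_mat n m → Pre_generate_door_mat n m → Spec_generate_door_mat n m (generate_door_mat n m)

-- ===== LEMMAS AND PROOFS =====

theorem tdiv_two_nonpos (x : Int) (hx : x < 0) : Int.tdiv x 2 ≤ 0 := by
  have h : Int.tdiv x 2 = -(Int.tdiv (-x) 2) := by rw [← Int.neg_tdiv, neg_neg]
  rw [h, Int.tdiv_eq_ediv_of_nonneg (by omega)]; omega

theorem pyStrRep_nonpos (s : String) (k : Int) (hk : k ≤ 0) : pyStrRep s k = [] := by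
  unfold pyStrRep PySem.List.pyRepeat
  have : k.toNat = 0 := Int.toNat_of_nonpos hk
  simp [this]

-- truncating and flooring halves repeat identically: they agree for x ≥ 0, and both are ≤ 0 for x < 0
theorem pyStrRep_tdiv_floordiv (s : String) (x : Int) :
    pyStrRep s (Int.tdiv x 2) = pyStrRep s (PySem.Int.floordiv x 2) := by
  rcases (by omega : 0 ≤ x ∨ x < 0) with hx | hx
  · rw [Int.tdiv_eq_ediv_of_nonneg hx, PySem.Int.floordiv_eq_ediv_of_pos (by norm_num : (0:Int) < 2)]
  · rw [pyStrRep_nonpos s _ (tdiv_two_nonpos x hx),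
        pyStrRep_nonpos s _ ?_]
    rw [PySem.Int.floordiv_eq_ediv_of_pos (by norm_num : (0:Int) < 2)]
    omega

theorem gdm_design_eq_row (m i : Int) : gdmA_design m i = gdmB_row m i := by
  unfold gdmA_design gdmB_row
  rw [show i * 3 + 1 = 3 * i + 1 by ring, pyStrRep_tdiv_floordiv]

theorem foldl_append_map {α β : Type} (f : α → β) (l : List α) (init : List β) :
    l.foldl (fun acc i => acc ++ [f i]) init = init ++ l.map f := by
  induction l generalizing init with
  | nil => simp
  | cons x t ih => simp [List.foldl_cons, ih]

theorem foldl_wrap {α β : Type} (f : α → β) (l : List α) (init : List β) :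
    l.foldl (fun mat i => [f i] ++ mat ++ [f i]) init
      = (l.reverse.map f) ++ init ++ l.map f := by
  induction l generalizing init with
  | nil => simp
  | cons x t ih => rw [List.foldl_cons]; rw [ih]; simp

theorem ranges_eq (n : Int) :
    PySem.List.pyRange 0 (Int.tdiv n 2) 1 = PySem.List.pyRange 0 (PySem.Int.floordiv n 2) 1 := by
  rcases (by omega : 0 ≤ n ∨ n < 0) with hn | hn
  · rw [Int.tdiv_eq_ediv_of_nonneg hn, PySem.Int.floordiv_eq_ediv_of_pos (by norm_num : (0:Int) < 2)]
  · rw [PySem.List.pyRange_one_eq_nil (tdiv_two_nonpos n hn),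
        PySem.List.pyRange_one_eq_nil ?_]
    rw [PySem.Int.floordiv_eq_ediv_of_pos (by norm_num : (0:Int) < 2)]
    omega

-- ===== VERDICT (by name: the statement is the Claim_ definition above) =====
theorem generate_door_mat_spec : Claim_equal_generate_door_mat := by
  intro n m _ hpre
  unfold Spec_generate_door_mat generate_door_mat generate_door_mat_alt
  rw [if_neg hpre, if_neg hpre]
  simp only []
  rw [foldl_append_map, foldl_append_map, foldl_wrap,
      PySem.List.pyRange_neg_one_eq_reverse]
  have hr : Int.tdiv n 2 - 1 + 1 = Int.tdiv n 2 := by ring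
  rw [show (-1 : Int) + 1 = 0 by ring, hr]
  rw [ranges_eq n, List.reverse_reverse,
      funext (gdm_design_eq_row m), pyStrRep_tdiv_floordiv]
  simp
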